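-- pv_equiv track=rewrite | github.com/Lekha-Reddy-git-hub/thoughtlink | src/temporal_embedding.py | assign_phases
-- ===== SOURCE A (Python) =====
-- def assign_phases(n_windows, label):
--     """Assign phase labels to each window based on position and label."""
--     phases = []
--     for i in range(n_windows):
--         if label == "Relax":
--             phases.append("rest")
--         elif i < 2:
--             phases.append("rest")
--         elif i == 2:
--             phases.append("initiation")
--         else:
--             phases.append("sustained")
--     return phases
-- ===== SOURCE B (Python) =====
-- def assign_phases(n_windows, label):
--     """Assign phase labels to each window based on position and label."""
--     if label == "Relax":
--         return ["rest"] * n_windows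
--     return (["rest"] * min(2, n_windows)
--             + (["initiation"] if n_windows > 2 else [])
--             + ["sustained"] * max(0, n_windows - 3))
-- ===== Notes on version B (the rewrite author's own statement) =====
-- stated objective: simpler
-- what changed: Replaces the per-index loop with direct concatenation of repeated segments (['rest']*min(2,n) + optional ['initiation'] + ['sustained']*max(0,n-3)), clamped so negative/small n fall out naturally.
import Mathlib
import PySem

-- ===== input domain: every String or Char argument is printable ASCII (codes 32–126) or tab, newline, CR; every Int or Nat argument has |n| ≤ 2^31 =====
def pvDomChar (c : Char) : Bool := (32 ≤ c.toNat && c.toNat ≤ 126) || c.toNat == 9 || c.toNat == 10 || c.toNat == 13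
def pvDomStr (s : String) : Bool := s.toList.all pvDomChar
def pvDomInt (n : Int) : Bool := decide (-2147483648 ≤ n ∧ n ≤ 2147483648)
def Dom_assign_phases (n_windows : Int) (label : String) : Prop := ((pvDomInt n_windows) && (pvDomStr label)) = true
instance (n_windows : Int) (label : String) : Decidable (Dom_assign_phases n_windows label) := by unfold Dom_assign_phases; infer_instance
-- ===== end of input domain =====

-- B builds the list by concatenating repeated segments instead of A's per-index loop (objective: simpler).

-- ===== PORT A =====
def assign_phases (n_windows : Int) (label : String) : List String :=
  (PySem.List.pyRange 0 n_windows 1).foldl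
    (fun phases i =>
      if label == "Relax" then phases ++ ["rest"]
      else if i < 2 then phases ++ ["rest"]
      else if i = 2 then phases ++ ["initiation"]
      else phases ++ ["sustained"]) []

-- ===== PORT B =====
def assign_phases_alt (n_windows : Int) (label : String) : List String :=
  if label == "Relax" then List.replicate n_windows.toNat "rest"
  else List.replicate (min 2 n_windows).toNat "rest"
       ++ (if n_windows > 2 then ["initiation"] else [])
       ++ List.replicate (max 0 (n_windows - 3)).toNat "sustained"

-- ===== PRECONDITION & SPEC =====
def Spec_assign_phases (n_windows : Int) (label : String) (out : List String) : Prop := out = assign_phases_alt n_windows label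
instance (n_windows : Int) (label : String) (out : List String) : Decidable (Spec_assign_phases n_windows label out) := by unfold Spec_assign_phases; infer_instance

-- ===== CLAIM (what is proved, stated in full; the proofs are below) =====
def Claim_equal_assign_phases : Prop := ∀ (n_windows : Int) (label : String), Dom_assign_phases n_windows label → Spec_assign_phases n_windows label (assign_phases n_windows label)

-- ===== LEMMAS AND PROOFS =====

-- A's loop over range(k+1) = loop over range(k) plus the element for index k.
theorem assign_phases_succ (k : Nat) (label : String) :
    assign_phases ((k : Int) + 1) label =
      assign_phases (k : Int) label ++
        [if label == "Relax" then "rest"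
         else if (k : Int) < 2 then "rest"
         else if (k : Int) = 2 then "initiation"
         else "sustained"] := by
  unfold assign_phases
  rw [PySem.List.pyRange_one_succ_right (by positivity), List.foldl_append]
  simp only [List.foldl_cons, List.foldl_nil]
  split_ifs <;> rfl

theorem assign_phases_eq_alt_nat (k : Nat) (label : String) :
    assign_phases (k : Int) label = assign_phases_alt (k : Int) label := by
  induction k with
  | zero =>
    unfold assign_phases assign_phases_alt
    rw [PySem.List.pyRange_one_eq_nil (by omega)]
    simp only [List.foldl_nil]
    split_ifs <;> simp_all
  | succ k ih =>
    have h : ((k + 1 : Nat) : Int) = (k : Int) + 1 := by push_cast; ring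
    rw [h, assign_phases_succ, ih]
    unfold assign_phases_alt
    by_cases hR : label == "Relax"
    · simp [hR, List.replicate_succ']
    · simp only [hR, if_neg, Bool.false_eq_true, not_false_eq_true]
      rcases Nat.lt_or_ge k 2 with hk | hk
      · have h2 : (k : Int) < 2 := by exact_mod_cast hk
        have hmin : min 2 ((k : Int) + 1) = (k : Int) + 1 := by omega
        have hmin' : min 2 (k : Int) = (k : Int) := by omega
        have hgt : ¬ ((k : Int) + 1 > 2) := by omega
        have hgt' : ¬ ((k : Int) > 2) := by omega
        have hmax : max 0 ((k : Int) + 1 - 3) = 0 := by omega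
        have hmax' : max 0 ((k : Int) - 3) = 0 := by omega
        simp [h2, hmin', hgt, hgt', hmax, hmax', List.replicate_succ']
      · have h2 : ¬ ((k : Int) < 2) := by omega
        have hmin : min 2 ((k : Int) + 1) = 2 := by omega
        have hmin' : min 2 (k : Int) = 2 := by omega
        rcases Nat.eq_or_lt_of_le hk with heq | hlt
        · have hkeq : (k : Int) = 2 := by omega
          simp [hkeq]
        · have hne : ¬ ((k : Int) = 2) := by omega
          have hgt : ((k : Int) + 1 > 2) := by omega
          have hgt' : ((k : Int) > 2) := by omega
          have hmax : (max 0 ((k : Int) + 1 - 3)).toNat = (max 0 ((k : Int) - 3)).toNat + 1 := by omega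
          simp [h2, hne, hgt, hgt', hmax, hmin, hmin', List.replicate_succ']

-- ===== VERDICT (by name: the statement is the Claim_ definition above) =====
theorem assign_phases_spec : Claim_equal_assign_phases := by
  intro n label _
  unfold Spec_assign_phases
  rcases (by omega : 0 ≤ n ∨ n < 0) with hn | hn
  · obtain ⟨k, rfl⟩ := Int.eq_ofNat_of_zero_le hn
    exact assign_phases_eq_alt_nat k label
  · unfold assign_phases assign_phases_alt
    rw [PySem.List.pyRange_one_eq_nil (by omega)]
    have h1 : n.toNat = 0 := by omega
    have h2 : (min 2 n).toNat = 0 := by omega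
    have h3 : ¬ (n > 2) := by omega
    have h4 : (max 0 (n - 3)).toNat = 0 := by omega
    simp [h1, h2, h3, h4]
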